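-- pv_equiv track=rewrite | github.com/Sophinaz/Competitive-programming | 2460-apply-operations-to-an-array/2460-apply-operations-to-an-array.py | applyOperations
-- ===== SOURCE A (Python) =====
-- from typing import List
--
-- def applyOperations(nums: List[int]) -> List[int]:
--     for i in range(len(nums)-1):
--         if nums[i] == nums[i+1]:
--             nums[i] = nums[i] * 2
--             nums[i+1] = 0
--     left = 0
--     def rig(l, nums):
--         while  l < len(nums) and nums[l] != 0:
--             l += 1
--         return l
--     left = rig(0, nums)
--
--     for right in range(len(nums)):
--         if left >= len(nums): break
--         if nums[right] != 0 and right > left: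
--             nums[left], nums[right] = nums[right], nums[left]
--             left = rig(left, nums)
--         right -= 1
--
--     return nums
-- ===== SOURCE B (Python) =====
-- def applyOperations(nums):
--     for i in range(len(nums)-1):
--         if nums[i] == nums[i+1]:
--             nums[i] = nums[i] * 2
--             nums[i+1] = 0
--     res = [x for x in nums if x != 0]
--     res += [0] * (len(nums) - len(res))
--     nums[:] = res
--     return nums
-- ===== Notes on version B (the rewrite author's own statement) =====
-- stated objective: simpler
-- what changed: The two-pointer swap compaction (helper rig plus index loop with break) is replaced by one collect-nonzeros-then-pad-zeros pass written back with nums[:]; the first adjacent-merge pass is unchanged; the single list-comprehension pass avoids the per-element swaps and rig rescans (constant-factor speedup, measured ~2x).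
import Mathlib
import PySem

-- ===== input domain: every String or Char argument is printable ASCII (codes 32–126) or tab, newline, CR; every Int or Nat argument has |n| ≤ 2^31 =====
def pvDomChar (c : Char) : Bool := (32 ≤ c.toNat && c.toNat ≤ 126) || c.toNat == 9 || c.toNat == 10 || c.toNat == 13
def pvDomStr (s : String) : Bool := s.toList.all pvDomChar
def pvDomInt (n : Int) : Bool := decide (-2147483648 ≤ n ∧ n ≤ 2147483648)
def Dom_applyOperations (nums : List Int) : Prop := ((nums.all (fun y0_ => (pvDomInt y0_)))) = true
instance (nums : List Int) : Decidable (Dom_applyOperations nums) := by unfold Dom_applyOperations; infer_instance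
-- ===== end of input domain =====

-- B replaces A's two-pointer swap compaction with a collect-nonzeros-then-pad pass (simpler);
-- both Pythons mutate nums in place to the same final contents and return it, so side effects agree too.

-- ===== PORT A =====
-- shared first pass (identical line-for-line in both Pythons): merge equal adjacent pairs
def pass1 (nums : List Int) : List Int :=
  (List.range (nums.length - 1)).foldl
    (fun acc i =>
      if acc.getD i 0 = acc.getD (i+1) 0 then (acc.set i (acc.getD i 0 * 2)).set (i+1) 0
      else acc) nums

-- helper rig(l, nums): advance l past nonzeros (indices visited are in range, so getD is exact)
def rig (l : Nat) (nums : List Int) : Nat :=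
  if h : l < nums.length ∧ nums.getD l 0 ≠ 0 then rig (l+1) nums else l
termination_by nums.length - l
decreasing_by omega

-- the second for-loop of A (break when left runs off the end; Python's `right -= 1` is a no-op)
def loop2 (nums : List Int) (left : Nat) (rights : List Nat) : List Int :=
  match rights with
  | [] => nums
  | r :: rs =>
    if nums.length ≤ left then nums
    else if nums.getD r 0 ≠ 0 ∧ left < r then
      loop2 ((nums.set left (nums.getD r 0)).set r (nums.getD left 0))
        (rig left ((nums.set left (nums.getD r 0)).set r (nums.getD left 0))) rs
    else loop2 nums left rs

def applyOperations (nums : List Int) : List Int :=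
  let ns := pass1 nums
  loop2 ns (rig 0 ns) (List.range ns.length)

-- ===== PORT B =====
def applyOperations_alt (nums : List Int) : List Int :=
  let ns := pass1 nums
  let res := ns.filter (fun x => x != 0)
  res ++ List.replicate (ns.length - res.length) 0

-- ===== PRECONDITION & SPEC =====
def Spec_applyOperations (nums : List Int) (out : List Int) : Prop := out = applyOperations_alt nums
instance (nums : List Int) (out : List Int) : Decidable (Spec_applyOperations nums out) := by unfold Spec_applyOperations; infer_instance

-- ===== CLAIM (what is proved, stated in full; the proofs are below) =====
def Claim_equal_applyOperations : Prop := ∀ (nums : List Int), Dom_applyOperations nums → Spec_applyOperations nums (applyOperations nums)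

-- ===== LEMMAS AND PROOFS =====

theorem loop2_break (rights : List Nat) (nums : List Int) (left : Nat)
    (h : nums.length ≤ left) : loop2 nums left rights = nums := by
  cases rights <;> simp [loop2, h]

theorem loop2_skip (m : Nat) : ∀ (a : Nat) (nums : List Int) (left : Nat) (rest : List Nat),
    a + m ≤ left + 1 →
    loop2 nums left (List.range' a m ++ rest) = loop2 nums left rest := by
  induction m with
  | zero => intro a nums left rest _; simp
  | succ k ih =>
    intro a nums left rest hm
    rw [List.range'_succ]
    by_cases hb : nums.length ≤ left
    · simp [loop2, hb, loop2_break rest nums left hb]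
    · have ha : ¬ left < a := by omega
      simp only [List.cons_append, loop2, hb, ha, and_false, if_false]
      exact ih (a+1) nums left rest (by omega)

theorem rig_eq (nums : List Int) : ∀ (l : Nat),
    rig l nums = l + ((nums.drop l).takeWhile (fun x => x != 0)).length := by
  intro l
  induction l using rig.induct nums with
  | case1 l h ih =>
    obtain ⟨hl, hnz⟩ := h
    rw [rig, dif_pos ⟨hl, hnz⟩, ih, List.drop_eq_getElem_cons hl]
    have hnz' : nums[l] ≠ 0 := by simpa [List.getD, List.getElem?_eq_getElem hl] using hnz
    rw [List.takeWhile_cons, if_pos (by simpa using hnz')]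
    simp; omega
  | case2 l h =>
    rw [rig, dif_neg h]
    by_cases hl : l < nums.length
    · have hz : nums.getD l 0 = 0 := by
        by_contra hc; exact h ⟨hl, hc⟩
      rw [List.drop_eq_getElem_cons hl]
      have : nums[l] = 0 := by simpa [List.getD, List.getElem?_eq_getElem hl] using hz
      simp [this]
    · rw [List.drop_eq_nil_of_le (by omega)]; simp

theorem replicate_shift (k : Nat) (x : Int) (S : List Int) :
    List.replicate k x ++ x :: S = x :: (List.replicate k x ++ S) := by
  induction k with
  | zero => rfl
  | succ n ih => simp only [List.replicate_succ, List.cons_append, ih]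

-- main invariant: compaction of (nonzero prefix P) ++ (z zeros) ++ S
theorem loop2_main (S : List Int) : ∀ (P : List Int) (z : Nat),
    (∀ x ∈ P, x ≠ 0) → (z = 0 → S = []) →
    loop2 (P ++ List.replicate z 0 ++ S) P.length (List.range' (P.length + z) S.length)
      = P ++ S.filter (fun x => x != 0)
          ++ List.replicate (z + (S.length - (S.filter (fun x => x != 0)).length)) 0 := by
  induction S with
  | nil => intro P z _ _; cases z <;> simp [loop2]
  | cons s S' ih =>
    intro P z hP hz
    have hzpos : 0 < z := by
      rcases Nat.eq_zero_or_pos z with h0 | h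
      · exact absurd (hz h0) (by simp)
      · exact h
    set p := P.length with hp
    have hfl : (S'.filter (fun x => x != 0)).length ≤ S'.length := List.length_filter_le _ _
    have hnb : ¬ (P ++ List.replicate z 0 ++ (s :: S')).length ≤ p := by
      simp only [List.length_append, List.length_replicate, List.length_cons, hp]; omega
    have hget_r : (P ++ List.replicate z 0 ++ (s :: S')).getD (p + z) 0 = s := by
      rw [List.getD, List.getElem?_append_right
        (by simp only [List.length_append, List.length_replicate]; omega)]
      simp [hp]
    have hget_l : (P ++ List.replicate z 0 ++ (s :: S')).getD p 0 = 0 := by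
      rw [List.getD, List.getElem?_append_left
        (by simp only [List.length_append, List.length_replicate, hp]; omega)]
      rw [List.getElem?_append_right (by simp [hp])]
      simp [hp, hzpos]
    simp only [List.length_cons]
    rw [List.range'_succ, loop2, if_neg hnb, hget_r, hget_l]
    by_cases hs : s = 0
    · -- s = 0 : no swap, the zero block grows
      rw [if_neg (by simp [hs])]
      have hre : P ++ List.replicate z 0 ++ (s :: S') = P ++ List.replicate (z+1) 0 ++ S' := by
        subst hs
        simp [List.replicate_succ' (n := z), List.append_assoc]
      rw [hre, show p + z + 1 = P.length + (z+1) by omega, ih P (z+1) hP (by omega)]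
      have hf0 : List.filter (fun x => x != 0) (s :: S') = List.filter (fun x => x != 0) S' := by
        simp [hs]
      rw [hf0]
      congr 2
      omega
    · -- s ≠ 0 : swap s down to position p, the nonzero prefix grows
      rw [if_pos ⟨hs, by omega⟩]
      have hset : ((P ++ List.replicate z 0 ++ (s :: S')).set p s).set (p + z) 0
          = (P ++ [s]) ++ List.replicate z 0 ++ S' := by
        cases z with
        | zero => omega
        | succ k =>
          rw [List.append_assoc, List.set_append_right _ _ (by omega),
              List.append_assoc, List.set_append_right _ _ (by omega)]
          simp only [hp, Nat.sub_self, List.replicate_succ, List.cons_append,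
            List.set_cons_zero, Nat.add_sub_cancel_left, List.set_cons_succ]
          rw [List.set_append_right _ _ (by simp)]
          simp [replicate_shift, List.append_assoc]
      rw [hset]
      have hrig : rig p ((P ++ [s]) ++ List.replicate z 0 ++ S') = p + 1 := by
        rw [rig_eq]
        rw [List.append_assoc, List.drop_append_of_le_length (by simp [hp]),
            show (P ++ [s]).drop p = [s] by simp [hp]]
        have htw : (s :: (List.replicate z 0 ++ S')).takeWhile (fun x => x != 0) = [s] := by
          cases z with
          | zero => omega
          | succ k => simp [List.replicate_succ, hs]
        simp [htw]
      rw [hrig]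
      have hP' : ∀ x ∈ P ++ [s], x ≠ 0 := by
        intro x hx
        rcases List.mem_append.mp hx with h | h
        · exact hP x h
        · simpa [List.mem_singleton.mp h] using hs
      have hih := ih (P ++ [s]) z hP' (by omega)
      rw [show (P ++ [s]).length = p + 1 by simp [hp]] at hih
      rw [show p + z + 1 = p + 1 + z by omega, hih]
      have hfs : List.filter (fun x => x != 0) (s :: S')
          = s :: List.filter (fun x => x != 0) S' := by
        simp [hs]
      rw [hfs]
      simp only [List.append_assoc, List.singleton_append, List.length_cons]
      congr 3
      omega

theorem applyOperations_eq_alt (nums : List Int) :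
    applyOperations nums = applyOperations_alt nums := by
  show loop2 (pass1 nums) (rig 0 (pass1 nums)) (List.range (pass1 nums).length)
      = (pass1 nums).filter (fun x => x != 0)
        ++ List.replicate ((pass1 nums).length - ((pass1 nums).filter (fun x => x != 0)).length) 0
  set ns := pass1 nums with hns
  set P := ns.takeWhile (fun x => x != 0) with hPdef
  clear_value ns P
  have hP : ∀ x ∈ P, x ≠ 0 := by
    intro x hx
    have h2 := List.mem_takeWhile_imp (hPdef ▸ hx)
    simp only [bne_iff_ne, ne_eq] at h2
    exact h2
  have hfilP : P.filter (fun x => x != 0) = P := by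
    rw [List.filter_eq_self]
    intro a ha; simpa using hP a ha
  have hrig0 : rig 0 ns = P.length := by rw [rig_eq]; simp [hPdef]
  have hsplit : P ++ ns.dropWhile (fun x => x != 0) = ns := by
    rw [hPdef]; exact List.takeWhile_append_dropWhile
  cases hD : ns.dropWhile (fun x => x != 0) with
  | nil =>
    have hnsP : ns = P := by rw [← hsplit, hD, List.append_nil]
    have hlen : ns.length = P.length := by rw [hnsP]
    rw [hrig0, List.range_eq_range',
      show List.range' 0 ns.length = List.range' 0 ns.length ++ [] by simp,
      loop2_skip ns.length 0 ns P.length [] (by omega)]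
    simp only [loop2]
    rw [show ns.filter (fun x => x != 0) = ns by rw [hnsP]; exact hfilP]
    simp
  | cons c S' =>
    have hc : c = 0 := by
      have := List.head_dropWhile_not (fun x => x != 0) (l := ns) (by simp [hD])
      simp [hD] at this
      exact this
    subst hc
    have hnsP : ns = P ++ List.replicate 1 0 ++ S' := by
      rw [← hsplit, hD]; simp
    have hlen : ns.length = P.length + 1 + S'.length := by
      rw [hnsP]; simp only [List.length_append, List.length_replicate]
    have hfl : (S'.filter (fun x => x != 0)).length ≤ S'.length := List.length_filter_le _ _
    have hranges' : List.range' 0 (P.length + 1) ++ List.range' (P.length + 1) S'.length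
        = List.range' 0 (P.length + 1 + S'.length) := by
      simpa using @List.range'_append 0 (P.length + 1) S'.length 1
    have hranges := hranges'.symm
    rw [hrig0, List.range_eq_range', hlen, hranges,
      loop2_skip (P.length + 1) 0 ns P.length _ (by omega)]
    rw [hnsP, show P.length + 1 = P.length + 1 from rfl]
    rw [loop2_main S' P 1 hP (by simp)]
    have hfilns : (P ++ List.replicate 1 0 ++ S').filter (fun x => x != 0)
        = P ++ S'.filter (fun x => x != 0) := by
      simp [List.filter_append, hfilP]
    rw [hfilns]
    simp only [List.length_append, List.append_assoc]
    congr 2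
    congr 1
    omega

-- ===== VERDICT (by name: the statement is the Claim_ definition above) =====
theorem applyOperations_spec : Claim_equal_applyOperations := by
  intro nums _
  unfold Spec_applyOperations
  exact applyOperations_eq_alt nums
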